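-- pv_equiv track=rewrite | github.com/Reminiscent/join-order-benchmark | bench/bench.py | first_error_line
-- ===== SOURCE A (Python) =====
-- def first_error_line(output: str) -> str:
--     for line in output.splitlines():
--         s = line.strip()
--         if not s:
--             continue
--         if s.startswith("ERROR:") or s.startswith("FATAL:") or s.startswith("psql:"):
--             return s
--     # Fallback: first non-empty line.
--     for line in output.splitlines():
--         s = line.strip()
--         if s:
--             return s
--     return ""
-- ===== SOURCE B (Python) =====
-- def first_error_line(output: str) -> str:
--     first_nonempty = None
--     for line in output.splitlines():
--         s = line.strip()
--         if not s:
--             continue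
--         if s.startswith("ERROR:") or s.startswith("FATAL:") or s.startswith("psql:"):
--             return s
--         if first_nonempty is None:
--             first_nonempty = s
--     return first_nonempty if first_nonempty is not None else ""
-- ===== Notes on version B (the rewrite author's own statement) =====
-- stated objective: simpler
-- what changed: Replaced A's two sequential scans over splitlines() (error scan, then fallback scan) by a single pass that carries the first non-empty stripped line as accumulated state.
import Mathlib
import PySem

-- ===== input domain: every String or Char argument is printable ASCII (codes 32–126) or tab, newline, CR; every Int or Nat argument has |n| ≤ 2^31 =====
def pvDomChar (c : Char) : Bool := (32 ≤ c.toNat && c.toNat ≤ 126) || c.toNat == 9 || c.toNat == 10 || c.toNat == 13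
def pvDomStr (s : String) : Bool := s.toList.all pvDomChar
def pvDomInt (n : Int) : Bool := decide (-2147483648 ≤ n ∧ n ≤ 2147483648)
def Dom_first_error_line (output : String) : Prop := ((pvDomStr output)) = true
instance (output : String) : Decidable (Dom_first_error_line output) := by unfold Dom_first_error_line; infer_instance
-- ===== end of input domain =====

-- B merges A's two sequential scans into a single pass carrying the fallback as state (objective: simpler).

-- ===== PORT A =====
-- shared: line classified as error if it starts with one of the three prefixes
def pvIsErr (s : String) : Bool :=
  PySem.Str.startswith s "ERROR:" || PySem.Str.startswith s "FATAL:" || PySem.Str.startswith s "psql:"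

-- A's first loop: first stripped non-empty line with an error prefix
def pvFindErr : List String → Option String
  | [] => none
  | l :: ls =>
    let s := PySem.Str.strip l
    if s = "" then pvFindErr ls
    else if pvIsErr s then some s else pvFindErr ls

-- A's second loop: first stripped non-empty line
def pvFindNE : List String → Option String
  | [] => none
  | l :: ls =>
    let s := PySem.Str.strip l
    if s ≠ "" then some s else pvFindNE ls

def first_error_line (output : String) : String :=
  match pvFindErr (PySem.Str.splitlines output) with
  | some s => s
  | none =>
    match pvFindNE (PySem.Str.splitlines output) with
    | some s => s
    | none => ""

-- ===== PORT B =====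
-- single pass, carrying the first non-empty stripped line as the fallback accumulator
def pvGoB : List String → Option String → String
  | [], acc => acc.getD ""
  | l :: ls, acc =>
    let s := PySem.Str.strip l
    if s = "" then pvGoB ls acc
    else if pvIsErr s then s
    else pvGoB ls (if acc.isNone then some s else acc)

def first_error_line_alt (output : String) : String :=
  pvGoB (PySem.Str.splitlines output) none

-- ===== PRECONDITION & SPEC =====
def Spec_first_error_line (output : String) (out : String) : Prop := out = first_error_line_alt output
instance (output : String) (out : String) : Decidable (Spec_first_error_line output out) := by unfold Spec_first_error_line; infer_instance

-- ===== CLAIM (what is proved, stated in full; the proofs are below) =====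
def Claim_equal_first_error_line : Prop := ∀ (output : String), Dom_first_error_line output → Spec_first_error_line output (first_error_line output)

-- ===== LEMMAS AND PROOFS =====
theorem pvGoB_char (ls : List String) (acc : Option String) :
    pvGoB ls acc =
      match pvFindErr ls with
      | some e => e
      | none =>
        match acc with
        | some f => f
        | none => (pvFindNE ls).getD "" := by
  induction ls generalizing acc with
  | nil => cases acc <;> simp [pvGoB, pvFindErr, pvFindNE]
  | cons l ls ih =>
    simp only [pvGoB, pvFindErr, pvFindNE]
    by_cases hs : PySem.Str.strip l = ""
    · simp [hs, ih]
    · by_cases he : pvIsErr (PySem.Str.strip l)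
      · simp [hs, he]
      · cases acc <;> simp [hs, he, ih]

-- ===== VERDICT (by name: the statement is the Claim_ definition above) =====
theorem first_error_line_spec : Claim_equal_first_error_line := by
  intro output _
  unfold Spec_first_error_line first_error_line first_error_line_alt
  rw [pvGoB_char]
  cases pvFindErr (PySem.Str.splitlines output) <;>
    cases pvFindNE (PySem.Str.splitlines output) <;> simp
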